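-- pv_equiv track=rewrite | github.com/biostat821-2023/Final__project | src/analysis.py | find_age_distribution
-- ===== SOURCE A (Python) =====
-- from typing import List, Tuple, Dict, Any
--
-- def find_age_distribution(patients: List[Tuple]) -> dict:
--     """Find the age distribution of the patients."""
--     age_dict = {}
--     for patient in patients:
--         if patient[4] not in age_dict:
--             age_dict[patient[4]] = 1
--         else:
--             age_dict[patient[4]] += 1
--     return age_dict
-- ===== SOURCE B (Python) =====
-- def find_age_distribution(patients):
--     """Find the age distribution of the patients."""
--     ages = [patient[4] for patient in patients]
--     result = {}
--     for age in ages: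
--         if age not in result:
--             result[age] = ages.count(age)
--     return result
-- ===== Notes on version B (the rewrite author's own statement) =====
-- stated objective: alternative
-- what changed: Instead of one incrementing pass over a counter dict, B extracts the age column once and, for each first occurrence of an age, stores the full count obtained by scanning the column (ages.count), so no counter is ever incremented.
import Mathlib
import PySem

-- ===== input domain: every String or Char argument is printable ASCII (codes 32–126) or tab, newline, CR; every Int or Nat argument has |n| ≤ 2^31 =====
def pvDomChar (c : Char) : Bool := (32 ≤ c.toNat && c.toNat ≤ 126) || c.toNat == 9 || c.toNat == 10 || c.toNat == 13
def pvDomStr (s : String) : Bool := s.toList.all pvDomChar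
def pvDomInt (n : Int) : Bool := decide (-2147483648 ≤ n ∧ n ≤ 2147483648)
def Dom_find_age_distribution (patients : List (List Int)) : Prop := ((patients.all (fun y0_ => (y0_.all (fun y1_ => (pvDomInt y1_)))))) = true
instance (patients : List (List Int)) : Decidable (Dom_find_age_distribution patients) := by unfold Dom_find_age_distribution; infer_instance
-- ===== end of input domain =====

-- B replaces A's incrementing counter pass by extracting the age column once and storing,
-- at each age's first occurrence, its full count from a scan of that column (alternative decomposition, no speed claim).


-- ===== PORT A =====
-- A: one pass; for each patient, if its age is unseen insert 1, else increment.
def find_age_distribution (patients : List (List Int)) : List (Int × Int) :=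
  (patients.foldl (fun age_dict patient =>
      let k := PySem.List.pyGetD patient 4 0   -- patient[4]; Pre_ guarantees the index is in range
      if age_dict.contains k = false then age_dict.insert k 1
      else age_dict.modify k 0 (· + 1))
    PySem.Dict.empty).items

-- ===== PORT B =====
-- B: extract the age column, then for each first occurrence store the column count.
def find_age_distribution_alt (patients : List (List Int)) : List (Int × Int) :=
  let ages := patients.map (fun patient => PySem.List.pyGetD patient 4 0)
  (ages.foldl (fun result age =>
      if result.contains age then result
      else result.insert age (ages.count age : Int))
    PySem.Dict.empty).items

-- ===== PRECONDITION & SPEC =====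
-- Pre_ excludes patient records shorter than 5 fields, on which A raises IndexError.
def Pre_find_age_distribution (patients : List (List Int)) : Prop :=
  ∀ p ∈ patients, 5 ≤ p.length
instance (patients : List (List Int)) : Decidable (Pre_find_age_distribution patients) := by
  unfold Pre_find_age_distribution; infer_instance
def pvWitness_find_age_distribution : List (List Int) := [[1, 2, 3, 4, 30], [5, 6, 7, 8, 30], [9, 1, 2, 3, 41]]

def Spec_find_age_distribution (patients : List (List Int)) (out : List (Int × Int)) : Prop := out = find_age_distribution_alt patients
instance (patients : List (List Int)) (out : List (Int × Int)) : Decidable (Spec_find_age_distribution patients out) := by unfold Spec_find_age_distribution; infer_instance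

-- ===== CLAIM (what is proved, stated in full; the proofs are below) =====
def Claim_equal_find_age_distribution : Prop := ∀ (patients : List (List Int)), Dom_find_age_distribution patients → Pre_find_age_distribution patients → Spec_find_age_distribution patients (find_age_distribution patients)

-- ===== LEMMAS AND PROOFS =====

-- A's branch (insert-1 / increment) is exactly the counter step.
lemma a_step_eq_counter_step (d : PySem.Dict Int Int) (a : Int) :
    (if d.contains a = false then d.insert a 1 else d.modify a 0 (· + 1))
      = d.modify a 0 (· + 1) := by
  by_cases h : d.contains a = false
  · rw [if_pos h]
    simp [PySem.Dict.insert, PySem.Dict.modify, h, PySem.Dict.getD_of_not_contains _ _ h]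
  · rw [if_neg h]

-- A's whole loop is Counter(ages).
lemma a_eq_counter (patients : List (List Int)) :
    find_age_distribution patients =
      (PySem.Dict.counter (patients.map (fun p => PySem.List.pyGetD p 4 0))).items := by
  unfold find_age_distribution
  rw [PySem.Dict.counter_eq_foldl, List.foldl_map]
  congr 1
  apply PySem.List.foldl_congr_mem
  intro acc x _
  exact a_step_eq_counter_step acc (PySem.List.pyGetD x 4 0)

-- B's loop over any list, started from a dict of the canonical shape, keeps that shape.
lemma b_loop_shape (v : Int → Int) (l : List Int) (s : PySem.Set Int) :
    (l.foldl (fun result age =>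
        if result.contains age then result
        else result.insert age (v age))
      (PySem.Dict.mk (s.map (fun k => (k, v k))))).items
    = (PySem.Set.update s l).map (fun k => (k, v k)) := by
  induction l generalizing s with
  | nil => simp [PySem.Set.update]
  | cons a t ih =>
    simp only [List.foldl_cons]
    have hc : (PySem.Dict.mk (s.map (fun k => (k, v k)))).contains a = s.contains a := by
      simp [PySem.Dict.contains_eq_decide_mem_keys, PySem.Dict.keys]
    by_cases hm : s.contains a
    · rw [hc, if_pos hm]
      have : PySem.Set.update s (a :: t) = PySem.Set.update (PySem.Set.add s a) t := rfl
      rw [this, PySem.Set.add, if_pos hm]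
      exact ih s
    · rw [hc, if_neg (by simpa using hm)]
      have hins : (PySem.Dict.mk (s.map (fun k => (k, v k)))).insert a (v a)
          = PySem.Dict.mk ((s ++ [a]).map (fun k => (k, v k))) := by
        apply PySem.Dict.ext
        rw [PySem.Dict.items_insert_of_not_contains]
        · simp
        · rw [hc]; exact eq_false_of_ne_true hm
      rw [hins]
      have : PySem.Set.update s (a :: t) = PySem.Set.update (s ++ [a]) t := by
        show PySem.Set.update (PySem.Set.add s a) t = _
        rw [PySem.Set.add, if_neg hm]
      rw [this]
      exact ih (s ++ [a])

-- ===== VERDICT (by name: the statement is the Claim_ definition above) =====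
theorem find_age_distribution_spec : Claim_equal_find_age_distribution := by
  intro patients _ _
  unfold Spec_find_age_distribution find_age_distribution_alt
  rw [a_eq_counter, PySem.Dict.items_counter]
  have h := b_loop_shape
      (v := fun a => (((patients.map (fun patient => PySem.List.pyGetD patient 4 0)).count a : Int)))
      (patients.map (fun patient => PySem.List.pyGetD patient 4 0)) PySem.Set.empty
  rw [show (PySem.Dict.mk (((PySem.Set.empty : PySem.Set Int)).map
        (fun k => (k, (((patients.map (fun patient => PySem.List.pyGetD patient 4 0)).count k : Int)))))
        : PySem.Dict Int Int) = PySem.Dict.empty from rfl,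
      show PySem.Set.update (PySem.Set.empty : PySem.Set Int)
          (patients.map (fun patient => PySem.List.pyGetD patient 4 0))
        = PySem.Set.ofList (patients.map (fun patient => PySem.List.pyGetD patient 4 0)) from by
        simp [PySem.Set.update, PySem.Set.ofList_eq_foldl, PySem.Set.empty]] at h
  exact h.symm
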